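-- pv_equiv track=rewrite | github.com/LeoYeDev/mpc_uav | src/gp/buffer.py | _resolve_level_sparsity
-- ===== SOURCE A (Python) =====
-- from typing import Dict, List, Tuple, Optional
--
-- def _resolve_level_sparsity(n_levels: int, level_sparsity: Optional[List[int]]) -> List[int]:
--     if level_sparsity:
--         sparse = [max(1, int(s)) for s in level_sparsity]
--     else:
--         sparse = [1, 2, 5]
--
--     if len(sparse) < n_levels:
--         last = sparse[-1] if sparse else 1
--         for _ in range(n_levels - len(sparse)):
--             last = max(1, last + 3)
--             sparse.append(last)
--     return sparse[:n_levels]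
-- ===== SOURCE B (Python) =====
-- def _resolve_level_sparsity(n_levels, level_sparsity):
--     if level_sparsity:
--         sparse = [max(1, int(s)) for s in level_sparsity]
--     else:
--         sparse = [1, 2, 5]
--     start = sparse[-1]
--     tail = [start + 3 * k for k in range(1, n_levels - len(sparse) + 1)]
--     return (sparse + tail)[:n_levels]
-- ===== Notes on version B (the rewrite author's own statement) =====
-- stated objective: simpler
-- what changed: The step-by-step accumulator loop (last = max(1, last+3); append) is replaced by a one-shot closed-form tail [start + 3*k for k in range(...)], valid because every base element is >= 1 so max(1, last+3) always equals last+3.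
import Mathlib
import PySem

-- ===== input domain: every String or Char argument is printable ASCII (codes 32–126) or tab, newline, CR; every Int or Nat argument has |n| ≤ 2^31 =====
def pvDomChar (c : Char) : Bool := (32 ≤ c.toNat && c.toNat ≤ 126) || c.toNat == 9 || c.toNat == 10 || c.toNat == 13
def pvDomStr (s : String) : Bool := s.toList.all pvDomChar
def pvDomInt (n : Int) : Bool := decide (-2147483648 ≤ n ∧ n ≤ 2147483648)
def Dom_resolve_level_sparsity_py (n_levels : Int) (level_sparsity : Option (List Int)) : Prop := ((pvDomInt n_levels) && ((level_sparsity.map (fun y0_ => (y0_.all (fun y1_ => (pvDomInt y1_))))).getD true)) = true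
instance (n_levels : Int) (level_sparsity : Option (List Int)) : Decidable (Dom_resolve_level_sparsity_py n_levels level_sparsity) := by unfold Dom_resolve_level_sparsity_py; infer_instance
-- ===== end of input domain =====

-- B replaces A's accumulator loop (last = max(1, last+3); append) by a one-shot closed-form
-- tail [start + 3*k for k in range(1, n_levels-len+1)]; objective: simpler.

-- base list: "sparse = [max(1, int(s)) for s in level_sparsity] if level_sparsity else [1, 2, 5]"
-- (this construction is textually identical in A and in B; shared helper)
def pv_base (level_sparsity : Option (List Int)) : List Int :=
  match level_sparsity with
  | some l => if l ≠ [] then l.map (fun s => max 1 s) else [1, 2, 5]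
  | none => [1, 2, 5]

-- ===== PORT A =====
def resolve_level_sparsity_py (n_levels : Int) (level_sparsity : Option (List Int)) : List Int :=
  let sparse : List Int := pv_base level_sparsity
  let final : List Int :=
    if (sparse.length : Int) < n_levels then
      -- last = sparse[-1] if sparse else 1
      let last0 : Int := if sparse ≠ [] then (PySem.List.pyGet? sparse (-1)).getD 0 else 1
      -- for _ in range(n_levels - len(sparse)): last = max(1, last + 3); sparse.append(last)
      ((List.range (n_levels - (sparse.length : Int)).toNat).foldl
        (fun (st : List Int × Int) _ =>
          let last := max 1 (st.2 + 3)
          (st.1 ++ [last], last)) (sparse, last0)).1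
    else sparse
  PySem.List.slice final none (some n_levels)   -- sparse[:n_levels]

-- ===== PORT B =====
def resolve_level_sparsity_py_alt (n_levels : Int) (level_sparsity : Option (List Int)) : List Int :=
  let sparse : List Int := pv_base level_sparsity
  -- start = sparse[-1]  (sparse is never empty)
  let start : Int := (PySem.List.pyGet? sparse (-1)).getD 0
  -- tail = [start + 3*k for k in range(1, n_levels - len(sparse) + 1)]
  let tail : List Int :=
    (PySem.List.pyRange 1 (n_levels - (sparse.length : Int) + 1) 1).map (fun k => start + 3 * k)
  PySem.List.slice (sparse ++ tail) none (some n_levels)   -- (sparse + tail)[:n_levels]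

-- ===== PRECONDITION & SPEC =====
def Spec_resolve_level_sparsity_py (n_levels : Int) (level_sparsity : Option (List Int)) (out : List Int) : Prop := out = resolve_level_sparsity_py_alt n_levels level_sparsity
instance (n_levels : Int) (level_sparsity : Option (List Int)) (out : List Int) : Decidable (Spec_resolve_level_sparsity_py n_levels level_sparsity out) := by unfold Spec_resolve_level_sparsity_py; infer_instance

-- ===== CLAIM (what is proved, stated in full; the proofs are below) =====
def Claim_equal_resolve_level_sparsity_py : Prop := ∀ (n_levels : Int) (level_sparsity : Option (List Int)), Dom_resolve_level_sparsity_py n_levels level_sparsity → Spec_resolve_level_sparsity_py n_levels level_sparsity (resolve_level_sparsity_py n_levels level_sparsity)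

-- ===== LEMMAS AND PROOFS =====

-- A's loop, run m times from (xs, L) with L ≥ -2, appends the arithmetic tail L+3, L+6, …
lemma pv_loop_spec (m : Nat) (xs : List Int) (L : Int) (hL : -2 ≤ L) :
    (List.range m).foldl
      (fun (st : List Int × Int) _ =>
        let last := max 1 (st.2 + 3)
        (st.1 ++ [last], last)) (xs, L)
    = (xs ++ (List.range m).map (fun k : Nat => L + 3 * ((k : Int) + 1)), L + 3 * m) := by
  induction m with
  | zero => simp
  | succ m ih =>
    rw [List.range_succ, List.foldl_append, ih]
    simp only [List.foldl_cons, List.foldl_nil, List.map_append, List.map_cons,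
      List.map_nil]
    have h1 : max 1 (L + 3 * (m : Int) + 3) = L + 3 * ((m : Int) + 1) := by omega
    rw [h1]
    push_cast
    simp [List.append_assoc]

-- the base list is nonempty and all its elements are ≥ 1
lemma pv_base_ne (level_sparsity : Option (List Int)) : pv_base level_sparsity ≠ [] := by
  unfold pv_base
  cases level_sparsity with
  | none => simp
  | some l =>
    by_cases hl : l = []
    · subst hl; simp
    · simp [hl]

lemma pv_base_all (level_sparsity : Option (List Int)) :
    ∀ x ∈ pv_base level_sparsity, 1 ≤ x := by
  unfold pv_base
  cases level_sparsity with
  | none => intro x hx; fin_cases hx <;> norm_num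
  | some l =>
    by_cases hl : l = []
    · subst hl; intro x hx; fin_cases hx <;> norm_num
    · simp only [hl, ne_eq, not_false_eq_true, if_pos]
      intro x hx
      rcases List.mem_map.mp hx with ⟨s, _, rfl⟩
      exact le_max_left _ _

-- sparse[-1] on a nonempty list is a member
lemma pv_last_mem (xs : List Int) (h : xs ≠ []) :
    (PySem.List.pyGet? xs (-1)).getD 0 ∈ xs := by
  cases hg : PySem.List.pyGet? xs (-1) with
  | some x =>
    simpa [hg] using PySem.List.mem_of_pyGet?_eq_some xs hg
  | none =>
    rw [PySem.List.pyGet?_neg_one, List.getLast?_eq_none_iff] at hg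
    exact absurd hg h

-- ===== VERDICT (by name: the statement is the Claim_ definition above) =====
theorem resolve_level_sparsity_py_spec : Claim_equal_resolve_level_sparsity_py := by
  intro n_levels level_sparsity _
  unfold Spec_resolve_level_sparsity_py resolve_level_sparsity_py resolve_level_sparsity_py_alt
  dsimp only
  have hne := pv_base_ne level_sparsity
  have hall := pv_base_all level_sparsity
  set sparse : List Int := pv_base level_sparsity with hs
  have hL : 1 ≤ (PySem.List.pyGet? sparse (-1)).getD 0 :=
    hall _ (pv_last_mem sparse hne)
  by_cases hlt : (sparse.length : Int) < n_levels
  · rw [if_pos hlt, if_pos hne, pv_loop_spec _ _ _ (by omega), PySem.List.pyRange_one]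
    have he : (n_levels - (sparse.length : Int) + 1 - 1).toNat
         = (n_levels - (sparse.length : Int)).toNat := by omega
    rw [he, List.map_map]
    dsimp only
    congr 1
    congr 1
    apply List.map_congr_left
    intro k _
    simp only [Function.comp_apply]
    ring
  · rw [if_neg hlt]
    have he : PySem.List.pyRange 1 (n_levels - (sparse.length : Int) + 1) 1 = [] := by
      rw [PySem.List.pyRange_one]
      have h0 : (n_levels - (sparse.length : Int) + 1 - 1).toNat = 0 := by omega
      rw [h0]
      simp
    rw [he]
    simp
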